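-- pv_equiv track=rewrite | github.com/Herobrinemodder/mcseeds | get_user.py | encodeSeed
-- ===== SOURCE A (Python) =====
-- b = 'ABCDEFGHIJKLMNOPQRSTUVWXYZabcdefghijklmnopqrstuvwxyz0123456789+/'
--
-- array = ['','==','=']
--
-- def encodeSeed(data):
--     d = ''
--     encoded = ''
--     for p in range(0,len(data)):
--         d = d + "{0:08b}".format(ord(data[p]))
--     d=d+'0000'
--
--     for k in range(len(d)//6):
--         ha = int(d[k*6:k*6+6],2)
--         encoded = encoded + b[ha]
--     encoded = array[len(encoded)%3-1]+encoded
--     encoded = encoded[::-1]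
--     return encoded
-- ===== SOURCE B (Python) =====
-- b = 'ABCDEFGHIJKLMNOPQRSTUVWXYZabcdefghijklmnopqrstuvwxyz0123456789+/'
--
-- array = ['','==','=']
--
-- def encodeSeed(data):
--     # Pack the whole string into one big integer (8 bits per char), append the
--     # four zero bits, then emit base-64 digits from the least-significant end:
--     # that is exactly A's chunk sequence in reverse, so no final reversal.
--     M = 0
--     for ch in data:
--         M = M * 256 + ord(ch)
--     M *= 16
--     L = 8 * len(data) + 4
--     c = L // 6
--     M //= 2 ** (L % 6)   # the leftover low bits A's chunking never reads
--     out = []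
--     for _ in range(c):
--         out.append(b[M % 64])
--         M //= 64
--     return ''.join(out) + array[c % 3 - 1]
-- ===== Notes on version B (the rewrite author's own statement) =====
-- stated objective: alternative
-- what changed: Instead of concatenating a per-character 8-bit binary string and slicing it front-to-back into 6-bit chunks, B packs the whole input into one big integer, appends the four zero bits by multiplying by 16, and extracts base-64 digits from the least-significant end, which produces A's reversed output order directly with no string-of-bits and no final reversal; it trades string building for big-integer arithmetic, which is slower on very long inputs.
import Mathlib
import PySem

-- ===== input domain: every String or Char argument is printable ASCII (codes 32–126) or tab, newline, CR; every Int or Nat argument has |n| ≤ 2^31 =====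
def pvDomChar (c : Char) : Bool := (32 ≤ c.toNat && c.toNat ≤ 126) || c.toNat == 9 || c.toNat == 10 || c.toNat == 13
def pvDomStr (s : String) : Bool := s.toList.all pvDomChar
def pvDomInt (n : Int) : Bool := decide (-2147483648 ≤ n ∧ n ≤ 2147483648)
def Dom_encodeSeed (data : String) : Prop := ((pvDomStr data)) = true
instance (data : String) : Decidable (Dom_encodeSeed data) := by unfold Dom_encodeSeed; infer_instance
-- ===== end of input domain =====

-- B replaces A's bit-string building and front-to-back 6-bit chunking by one big
-- integer and least-significant-first base-64 digit extraction, which yields A's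
-- reversed output order directly (objective: alternative algorithm, same cost).

-- ===== PORT A =====
-- the module constant b
def b64Chars : List Char :=
  "ABCDEFGHIJKLMNOPQRSTUVWXYZabcdefghijklmnopqrstuvwxyz0123456789+/".toList
-- the module constant array (a list of Python strings, kept as char lists)
def padArray : List (List Char) := [[], ['=', '='], ['=']]

-- "{0:08b}".format m : binary digits of m (Nat.toDigits 2, most significant first;
-- toDigits 2 0 = ['0']), zero-padded on the left to width 8 — exact for every Nat m
def bits8 (m : Nat) : List Char :=
  let s := Nat.toDigits 2 m
  List.replicate (8 - s.length) '0' ++ s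

-- int(s, 2): exact on strings of '0'/'1', the only ones A feeds it
def parseBin (d : List Char) : Nat :=
  d.foldl (fun a c => a * 2 + (if c = '1' then 1 else 0)) 0

def encodeSeed (data : String) : String :=
  -- for p in range(0, len(data)): d = d + "{0:08b}".format(ord(data[p]))
  -- (indices 0..len-1 in order = the characters in order; data[p] never raises)
  let d := data.toList.foldl (fun d c => d ++ bits8 c.toNat) []
  let d := d ++ ['0', '0', '0', '0']
  -- for k in range(len(d)//6): encoded = encoded + b[ha]; ha < 64 always, so
  -- b[ha] never raises and .getD ' ' is never used
  let encoded := (List.range (d.length / 6)).foldl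
    (fun e k =>
      e ++ [(PySem.List.pyGet? b64Chars
        ((parseBin (PySem.List.slice d (some ((k * 6 : Nat) : Int))
          (some ((k * 6 + 6 : Nat) : Int))) : Nat) : Int)).getD ' ']) []
  -- encoded = array[len(encoded)%3-1] + encoded  (index is -1, 0 or 1: never raises)
  let encoded :=
    (PySem.List.pyGet? padArray ((encoded.length : Int) % 3 - 1)).getD [] ++ encoded
  -- encoded[::-1] = reverse (PySem.List.slice?_none_none_neg_one)
  String.mk encoded.reverse

-- ===== PORT B =====
def encodeSeed_alt (data : String) : String :=
  -- every integer in Source B is nonnegative, so Python's // and % agree with Nat / and %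
  let M := data.toList.foldl (fun m c => m * 256 + c.toNat) 0
  let M := M * 16
  let L := 8 * data.length + 4
  let c := L / 6
  let M := M / 2 ^ (L % 6)
  -- for _ in range(c): out.append(b[M % 64]); M //= 64   (M % 64 < 64: no raise)
  let out := (List.range c).foldl
    (fun (st : Nat × List Char) _ =>
      (st.1 / 64,
        st.2 ++ [(PySem.List.pyGet? b64Chars ((st.1 % 64 : Nat) : Int)).getD ' ']))
    (M, [])
  String.mk (out.2 ++ (PySem.List.pyGet? padArray ((c : Int) % 3 - 1)).getD [])

-- ===== PRECONDITION & SPEC =====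
def Spec_encodeSeed (data : String) (out : String) : Prop := out = encodeSeed_alt data
instance (data : String) (out : String) : Decidable (Spec_encodeSeed data out) := by
  unfold Spec_encodeSeed; infer_instance

-- ===== CLAIM (what is proved, stated in full; the proofs are below) =====
def Claim_equal_encodeSeed : Prop := ∀ (data : String), Dom_encodeSeed data → Spec_encodeSeed data (encodeSeed data)

-- ===== LEMMAS AND PROOFS =====

-- shifting the accumulator of a base-B digit fold
theorem foldl_base_shift (B : Nat) (g : Char → Nat) (d : List Char) (a : Nat) :
    d.foldl (fun a c => a * B + g c) a
      = a * B ^ d.length + d.foldl (fun a c => a * B + g c) 0 := by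
  induction d generalizing a with
  | nil => simp
  | cons c d ih =>
    simp only [List.foldl_cons, List.length_cons]
    rw [ih (a * B + g c), ih (0 * B + g c)]
    ring

theorem parseBin_append (x y : List Char) :
    parseBin (x ++ y) = parseBin x * 2 ^ y.length + parseBin y := by
  unfold parseBin
  rw [List.foldl_append, foldl_base_shift 2 _ y (x.foldl _ 0)]

theorem parseBin_lt (d : List Char) : parseBin d < 2 ^ d.length := by
  induction d with
  | nil => simp [parseBin]
  | cons c d ih =>
    have h : parseBin (c :: d)
        = (0 * 2 + (if c = '1' then 1 else 0)) * 2 ^ d.length + parseBin d := by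
      unfold parseBin
      simp only [List.foldl_cons]
      rw [foldl_base_shift 2 _ d]
    rw [h]
    have : (if c = '1' then 1 else 0) ≤ 1 := by split <;> omega
    have h2 : (2:Nat) ^ (c :: d).length = 2 * 2 ^ d.length := by
      simp [pow_succ]; ring
    rw [h2]; nlinarith

set_option maxRecDepth 4000 in
theorem bits8_len {m : Nat} (h : m < 256) : (bits8 m).length = 8 := by
  have hall : ((List.range 256).all fun m => (bits8 m).length == 8) = true := by decide
  simpa using List.all_eq_true.mp hall m (List.mem_range.mpr h)

set_option maxRecDepth 4000 in
theorem bits8_val {m : Nat} (h : m < 256) : parseBin (bits8 m) = m := by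
  have hall : ((List.range 256).all fun m => parseBin (bits8 m) == m) = true := by decide
  simpa using List.all_eq_true.mp hall m (List.mem_range.mpr h)

-- length and value of the concatenated bit string
theorem flat_len (cs : List Char) (h : ∀ c ∈ cs, c.toNat < 256) :
    (cs.flatMap fun c => bits8 c.toNat).length = 8 * cs.length := by
  induction cs with
  | nil => simp
  | cons c cs ih =>
    have hc : c.toNat < 256 := h c (by simp)
    simp only [List.flatMap_cons, List.length_append, List.length_cons,
      bits8_len hc, ih (fun x hx => h x (by simp [hx]))]
    ring

theorem flat_val (cs : List Char) (h : ∀ c ∈ cs, c.toNat < 256) :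
    parseBin (cs.flatMap fun c => bits8 c.toNat)
      = cs.foldl (fun m c => m * 256 + c.toNat) 0 := by
  induction cs with
  | nil => simp [parseBin]
  | cons c cs ih =>
    have hc : c.toNat < 256 := h c (by simp)
    have ht : ∀ x ∈ cs, x.toNat < 256 := fun x hx => h x (by simp [hx])
    simp only [List.flatMap_cons, List.foldl_cons]
    rw [parseBin_append, bits8_val hc, flat_len cs ht, ih ht,
      foldl_base_shift 256 _ cs (0 * 256 + c.toNat)]
    have : (2:Nat) ^ (8 * cs.length) = 256 ^ cs.length := by
      rw [pow_mul]; norm_num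
    rw [this]; ring

-- value of the k-th 6-bit chunk
theorem chunk_val (d : List Char) (k : Nat) (h : k * 6 + 6 ≤ d.length) :
    parseBin ((d.drop (k * 6)).take 6)
      = parseBin d / 2 ^ (d.length - (k * 6 + 6)) % 64 := by
  set t := d.take (k * 6) with ht
  set ch := (d.drop (k * 6)).take 6 with hch
  set rest := d.drop (k * 6 + 6) with hrest
  have hsplit : d = t ++ (ch ++ rest) := by
    rw [ht, hch, hrest]
    rw [← List.drop_drop]
    rw [List.take_append_drop, List.take_append_drop]
  have hchlen : ch.length = 6 := by
    rw [hch]; simp [List.length_take, List.length_drop]; omega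
  have hrestlen : rest.length = d.length - (k * 6 + 6) := by
    rw [hrest]; simp
  have hval : parseBin d
      = (parseBin t * 64 + parseBin ch) * 2 ^ rest.length + parseBin rest := by
    conv_lhs => rw [hsplit]
    rw [parseBin_append, parseBin_append, List.length_append, hchlen]
    have : (2:Nat) ^ (6 + rest.length) = 64 * 2 ^ rest.length := by
      rw [pow_add]; norm_num
    rw [this]; ring
  have hrb : parseBin rest < 2 ^ rest.length := parseBin_lt rest
  have hcb : parseBin ch < 64 := by
    have := parseBin_lt ch; rw [hchlen] at this; simpa using this
  rw [hval, ← hrestlen]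
  have hpos : 0 < 2 ^ rest.length := Nat.pow_pos (by norm_num)
  rw [Nat.mul_comm ((parseBin t * 64 + parseBin ch)) (2 ^ rest.length)]
  rw [Nat.add_comm, Nat.add_mul_div_left _ _ hpos, Nat.div_eq_of_lt hrb]
  rw [Nat.zero_add, Nat.mul_comm (parseBin t) 64, Nat.mul_add_mod,
    Nat.mod_eq_of_lt hcb]

-- B's extraction loop computes the base-64 digits, least significant first
theorem alt_loop (M n : Nat) :
    (List.range n).foldl
      (fun (st : Nat × List Char) _ =>
        (st.1 / 64,
          st.2 ++ [(PySem.List.pyGet? b64Chars ((st.1 % 64 : Nat) : Int)).getD ' ']))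
      (M, [])
      = (M / 64 ^ n,
        (List.range n).map (fun j =>
          (PySem.List.pyGet? b64Chars ((M / 64 ^ j % 64 : Nat) : Int)).getD ' ')) := by
  induction n with
  | zero => simp
  | succ n ih =>
    rw [List.range_succ, List.foldl_append, ih]
    simp [Nat.div_div_eq_div_mul, pow_succ]

theorem map_range_reverse {α : Type} (f : Nat → α) (n : Nat) :
    ((List.range n).map f).reverse = (List.range n).map (fun j => f (n - 1 - j)) := by
  apply List.ext_getElem (by simp)
  intro j h1 h2
  simp only [List.getElem_reverse, List.getElem_map, List.getElem_range,
    List.length_map, List.length_range]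

-- the pad entry is a palindrome, whichever of the three cases applies
theorem pad_palindrome (c : Nat) :
    ((PySem.List.pyGet? padArray ((c : Int) % 3 - 1)).getD []).reverse
      = (PySem.List.pyGet? padArray ((c : Int) % 3 - 1)).getD [] := by
  have h3 : c % 3 = 0 ∨ c % 3 = 1 ∨ c % 3 = 2 := by omega
  have hc : ((c : Int) % 3) = ((c % 3 : Nat) : Int) := by
    push_cast; ring
  rcases h3 with h | h | h <;> rw [hc, h] <;> decide

-- the reversed list of A's chunk characters is B's digit list, for any bit string d
theorem rev_chunks (d : List Char) :
    ((List.range (d.length / 6)).map (fun k =>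
        (PySem.List.pyGet? b64Chars
          ((parseBin (PySem.List.slice d (some ((k * 6 : Nat) : Int))
              (some ((k * 6 + 6 : Nat) : Int))) : Nat) : Int)).getD ' ')).reverse
      = (List.range (d.length / 6)).map (fun j =>
          (PySem.List.pyGet? b64Chars
            ((parseBin d / 2 ^ (d.length % 6) / 64 ^ j % 64 : Nat) : Int)).getD ' ') := by
  rw [map_range_reverse]
  apply List.map_congr_left
  intro j hj
  rw [List.mem_range] at hj
  set n := d.length / 6 with hn
  have h6 : 6 * n ≤ d.length := by rw [hn, Nat.mul_comm]; exact Nat.div_mul_le_self _ _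
  have hle : (n - 1 - j) * 6 + 6 ≤ d.length := by omega
  have hmod : d.length = 6 * n + d.length % 6 := by rw [hn, Nat.div_add_mod]
  have hexp : d.length - ((n - 1 - j) * 6 + 6) = d.length % 6 + 6 * j := by omega
  have h64 : (2 : Nat) ^ (6 * j) = 64 ^ j := by rw [pow_mul]; norm_num
  rw [PySem.List.slice_natCast, Nat.add_sub_cancel_left, chunk_val d (n - 1 - j) hle,
    hexp, pow_add, h64, ← Nat.div_div_eq_div_mul]

theorem encodeSeed_spec' (data : String) (hdom : Dom_encodeSeed data) :
    encodeSeed data = encodeSeed_alt data := by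
  have hlt : ∀ c ∈ data.toList, c.toNat < 256 := by
    intro c hc
    have h := List.all_eq_true.mp hdom c hc
    simp only [pvDomChar, Bool.or_eq_true, Bool.and_eq_true, decide_eq_true_eq,
      beq_iff_eq] at h
    omega
  simp only [encodeSeed, encodeSeed_alt]
  rw [PySem.List.foldl_append_singleton_eq_map, PySem.List.foldl_append_eq_flatMap,
    alt_loop]
  simp only [List.nil_append, List.length_map, List.length_range]
  set F := data.toList.flatMap (fun c => bits8 c.toNat) with hF
  have hlen : (F ++ ['0', '0', '0', '0']).length = 8 * data.length + 4 := by
    simp [hF, flat_len data.toList hlt, String.length_toList]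
  have hval : parseBin (F ++ ['0', '0', '0', '0'])
      = data.toList.foldl (fun m c => m * 256 + c.toNat) 0 * 2 ^ 4 := by
    rw [parseBin_append, hF, flat_val data.toList hlt]
    have h0 : parseBin ['0', '0', '0', '0'] = 0 := by decide
    rw [h0]
    norm_num
  apply congrArg String.mk
  rw [List.reverse_append, rev_chunks, pad_palindrome, hlen, hval]
  norm_num

-- ===== VERDICT (by name: the statement is the Claim_ definition above) =====
theorem encodeSeed_spec : Claim_equal_encodeSeed := by
  intro data hdom
  unfold Spec_encodeSeed
  exact encodeSeed_spec' data hdom
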